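-- pv_equiv track=rewrite | github.com/enspyrco/tech_world | tool/generate_barrier_indices.py | format_dart_set
-- ===== SOURCE A (Python) =====
-- def find_contiguous_ranges(indices: list[int]) -> list[tuple[int, int]]:
--     """Group sorted indices into contiguous (start, end) ranges."""
--     if not indices:
--         return []
--     ranges: list[tuple[int, int]] = []
--     start = indices[0]
--     end = indices[0]
--     for i in indices[1:]:
--         if i == end + 1:
--             end = i
--         else:
--             ranges.append((start, end))
--             start = i
--             end = i
--     ranges.append((start, end))
--     return ranges
--
-- def format_dart_set(name: str, indices: list[int], columns: int, rows: int) -> str: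
--     """Format as a Dart Set<int> using range-based for loops where possible."""
--     lines: list[str] = []
--     lines.append(f"final Set<int> _{name}Barriers = {{")
--
--     ranges = find_contiguous_ranges(indices)
--     for start, end in ranges:
--         count = end - start + 1
--         start_row = start // columns
--         end_row = end // columns
--         if count >= 8:
--             # Use a for loop for large contiguous ranges.
--             lines.append(
--                 f"  for (int i = {start}; i <= {end}; i++) i, "
--                 f"// rows {start_row}–{end_row} ({count} tiles)"
--             )
--         else:
--             # Inline small ranges.
--             vals = ", ".join(str(i) for i in range(start, end + 1))
--             lines.append(f"  {vals}, // row {start_row}")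
--
--     lines.append("};")
--     return "\n".join(lines)
-- ===== SOURCE B (Python) =====
-- def format_dart_set(name: str, indices: list[int], columns: int, rows: int) -> str:
--     """Format as a Dart Set<int>; runs found statelessly by zipping each element
--     with its right neighbour: run starts are elements not preceded by value-1,
--     run ends are elements not followed by value+1."""
--     adjacent = list(zip(indices, indices[1:]))
--     starts = indices[:1] + [b for a, b in adjacent if b != a + 1]
--     ends = [a for a, b in adjacent if b != a + 1] + indices[-1:]
--
--     def fmt(start: int, end: int) -> str:
--         count = end - start + 1
--         if count >= 8:
--             return (f"  for (int i = {start}; i <= {end}; i++) i, "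
--                     f"// rows {start // columns}\u2013{end // columns} ({count} tiles)")
--         return "  " + ", ".join(map(str, range(start, end + 1))) + f", // row {start // columns}"
--
--     return "\n".join([f"final Set<int> _{name}Barriers = {{"]
--                      + [fmt(s, e) for s, e in zip(starts, ends)]
--                      + ["};"])
-- ===== Notes on version B (the rewrite author's own statement) =====
-- stated objective: alternative
-- what changed: B replaces A's stateful run-merging loop (running start/end accumulator feeding an intermediate ranges list) by a stateless neighbour-zip decomposition: it zips each element with its successor, extracts the run starts and run ends as two filtered comprehensions, and zips those into the formatted lines.
import Mathlib
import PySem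

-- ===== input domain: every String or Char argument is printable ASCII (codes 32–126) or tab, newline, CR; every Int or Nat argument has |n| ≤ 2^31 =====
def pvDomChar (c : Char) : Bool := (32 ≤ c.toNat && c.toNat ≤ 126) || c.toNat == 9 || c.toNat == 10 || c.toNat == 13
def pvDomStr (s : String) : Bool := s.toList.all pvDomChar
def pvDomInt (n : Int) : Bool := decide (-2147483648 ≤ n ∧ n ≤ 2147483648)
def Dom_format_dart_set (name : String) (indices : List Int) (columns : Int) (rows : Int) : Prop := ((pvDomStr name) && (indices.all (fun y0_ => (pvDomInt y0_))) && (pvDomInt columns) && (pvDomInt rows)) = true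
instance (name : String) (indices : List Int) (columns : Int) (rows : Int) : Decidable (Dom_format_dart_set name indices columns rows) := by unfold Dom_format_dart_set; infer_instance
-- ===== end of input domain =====

-- B finds the runs statelessly by zipping neighbours (run starts / run ends as two filtered lists) instead of A's stateful merging loop; same output.

-- ===== PORT A =====
def find_contiguous_ranges (indices : List Int) : List (Int × Int) :=
  match indices with
  | [] => []
  | i0 :: _ =>
    let st := (PySem.List.slice indices (some 1) none).foldl
      (fun (s : List (Int × Int) × Int × Int) i =>
        if i == s.2.2 + 1 then (s.1, s.2.1, i)
        else (s.1 ++ [(s.2.1, s.2.2)], i, i))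
      ([], i0, i0)
    st.1 ++ [(st.2.1, st.2.2)]

def pvFmtLineA (columns : Int) (p : Int × Int) : String :=
  let start := p.1
  let e := p.2
  let count := e - start + 1
  let start_row := PySem.Int.floordiv start columns
  let end_row := PySem.Int.floordiv e columns
  if count ≥ 8 then
    "  for (int i = " ++ PySem.Int.toStr start ++ "; i <= " ++ PySem.Int.toStr e ++
      "; i++) i, // rows " ++ PySem.Int.toStr start_row ++ "–" ++ PySem.Int.toStr end_row ++
      " (" ++ PySem.Int.toStr count ++ " tiles)"
  else
    "  " ++ PySem.Str.join ", " ((PySem.List.pyRange start (e + 1) 1).map PySem.Int.toStr) ++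
      ", // row " ++ PySem.Int.toStr start_row

def format_dart_set (name : String) (indices : List Int) (columns : Int) (rows : Int) : String :=
  let lines : List String := ["final Set<int> _" ++ name ++ "Barriers = {"]
  let ranges := find_contiguous_ranges indices
  let lines := ranges.foldl (fun acc p => acc ++ [pvFmtLineA columns p]) lines
  let lines := lines ++ ["};"]
  PySem.Str.join "\n" lines

-- ===== PORT B =====
def pvFmtB (columns start e : Int) : String :=
  let count := e - start + 1
  if count ≥ 8 then
    "  for (int i = " ++ PySem.Int.toStr start ++ "; i <= " ++ PySem.Int.toStr e ++
      "; i++) i, // rows " ++ PySem.Int.toStr (PySem.Int.floordiv start columns) ++ "–" ++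
      PySem.Int.toStr (PySem.Int.floordiv e columns) ++ " (" ++ PySem.Int.toStr count ++ " tiles)"
  else
    "  " ++ PySem.Str.join ", " ((PySem.List.pyRange start (e + 1) 1).map PySem.Int.toStr) ++
      ", // row " ++ PySem.Int.toStr (PySem.Int.floordiv start columns)

def format_dart_set_alt (name : String) (indices : List Int) (columns : Int) (rows : Int) : String :=
  let adjacent := List.zip indices (PySem.List.slice indices (some 1) none)
  let starts := PySem.List.slice indices none (some 1) ++
    (adjacent.filter (fun p => p.2 != p.1 + 1)).map Prod.snd
  let ends := (adjacent.filter (fun p => p.2 != p.1 + 1)).map Prod.fst ++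
    PySem.List.slice indices (some (-1)) none
  PySem.Str.join "\n"
    (("final Set<int> _" ++ name ++ "Barriers = {") ::
      ((List.zip starts ends).map (fun p => pvFmtB columns p.1 p.2) ++ ["};"]))

-- ===== PRECONDITION & SPEC =====
-- Pre_ excludes only inputs where Python A raises ZeroDivisionError: nonempty indices with columns = 0.
def Pre_format_dart_set (name : String) (indices : List Int) (columns : Int) (rows : Int) : Prop :=
  indices = [] ∨ columns ≠ 0
instance (name : String) (indices : List Int) (columns : Int) (rows : Int) : Decidable (Pre_format_dart_set name indices columns rows) := by unfold Pre_format_dart_set; infer_instance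

def pvWitness_format_dart_set : String × List Int × Int × Int := ("maze", [1, 2, 3, 5, 6, 7, 8, 9, 10, 11, 12, 30], 20, 15)

def Spec_format_dart_set (name : String) (indices : List Int) (columns : Int) (rows : Int) (out : String) : Prop := out = format_dart_set_alt name indices columns rows
instance (name : String) (indices : List Int) (columns : Int) (rows : Int) (out : String) : Decidable (Spec_format_dart_set name indices columns rows out) := by unfold Spec_format_dart_set; infer_instance

-- ===== CLAIM =====
def Claim_equal_format_dart_set : Prop := ∀ (name : String) (indices : List Int) (columns : Int) (rows : Int), Dom_format_dart_set name indices columns rows → Pre_format_dart_set name indices columns rows → Spec_format_dart_set name indices columns rows (format_dart_set name indices columns rows)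

-- ===== LEMMAS AND PROOFS =====

-- ghost characterisation of the contiguous ranges of the run s..e followed by l
def pvRanges (s e : Int) : List Int → List (Int × Int)
  | [] => [(s, e)]
  | i :: rest => if i == e + 1 then pvRanges s i rest else (s, e) :: pvRanges i i rest

-- end of the current run, and the ranges after it
def pvEnd (e : Int) : List Int → Int
  | [] => e
  | i :: rest => if i == e + 1 then pvEnd i rest else e

def pvTail (e : Int) : List Int → List (Int × Int)
  | [] => []
  | i :: rest => if i == e + 1 then pvTail i rest else pvRanges i i rest

lemma pvRanges_eq (l : List Int) : ∀ (s e : Int), pvRanges s e l = (s, pvEnd e l) :: pvTail e l := by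
  induction l with
  | nil => intro s e; simp [pvRanges, pvEnd, pvTail]
  | cons i rest ih =>
    intro s e
    simp only [pvRanges, pvEnd, pvTail]
    by_cases h : (i == e + 1) = true
    · rw [if_pos h, if_pos h, if_pos h]; exact ih s i
    · rw [if_neg h, if_neg h, if_neg h, ih i i]

lemma foldl_ranges (l : List Int) : ∀ (acc : List (Int × Int)) (s e : Int),
    (l.foldl (fun (st : List (Int × Int) × Int × Int) i =>
        if i == st.2.2 + 1 then (st.1, st.2.1, i)
        else (st.1 ++ [(st.2.1, st.2.2)], i, i)) (acc, s, e)).1 ++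
      [((l.foldl (fun (st : List (Int × Int) × Int × Int) i =>
        if i == st.2.2 + 1 then (st.1, st.2.1, i)
        else (st.1 ++ [(st.2.1, st.2.2)], i, i)) (acc, s, e)).2.1,
        (l.foldl (fun (st : List (Int × Int) × Int × Int) i =>
        if i == st.2.2 + 1 then (st.1, st.2.1, i)
        else (st.1 ++ [(st.2.1, st.2.2)], i, i)) (acc, s, e)).2.2)] =
    acc ++ pvRanges s e l := by
  induction l with
  | nil => intro acc s e; simp [pvRanges]
  | cons i rest ih =>
    intro acc s e
    simp only [List.foldl_cons, pvRanges]
    by_cases h : (i == e + 1) = true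
    · rw [if_pos h, if_pos h]; exact ih acc s i
    · rw [if_neg h, if_neg h, ih, List.append_assoc]; rfl

lemma fcr_eq (i0 : Int) (rest : List Int) :
    find_contiguous_ranges (i0 :: rest) = pvRanges i0 i0 rest := by
  simpa [find_contiguous_ranges, PySem.List.slice_from_one] using
    foldl_ranges rest [] i0 i0

-- B's starts/ends zip equals the ghost ranges
lemma zip_starts_ends (ys : List Int) : ∀ (i0 : Int),
    List.zip
      (i0 :: ((List.zip (i0 :: ys) ys).filter (fun p => p.2 != p.1 + 1)).map Prod.snd)
      (((List.zip (i0 :: ys) ys).filter (fun p => p.2 != p.1 + 1)).map Prod.fst ++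
        (i0 :: ys).drop ys.length)
    = pvRanges i0 i0 ys := by
  induction ys with
  | nil => intro i0; simp [pvRanges]
  | cons i1 ys' ih =>
    intro i0
    have hdrop : (i0 :: i1 :: ys').drop (i1 :: ys').length = (i1 :: ys').drop ys'.length := by
      simp
    by_cases h : (i1 != i0 + 1) = true
    · -- new run starts at i1
      have hzip : List.zip (i0 :: i1 :: ys') (i1 :: ys') = (i0, i1) :: List.zip (i1 :: ys') ys' := by
        simp [List.zip]
      simp only [List.length_cons] at hdrop ⊢
      rw [show (i0 :: i1 :: ys').drop (ys'.length + 1) = (i1 :: ys').drop ys'.length from hdrop]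
      rw [hzip, List.filter_cons, if_pos (show (((i0, i1).2 != (i0, i1).1 + 1)) = true from h)]
      simp only [List.map_cons, List.cons_append, List.zip_cons_cons]
      rw [ih i1]
      have h' : (i1 == i0 + 1) = false := by
        cases hb : (i1 == i0 + 1) <;> simp_all
      simp [pvRanges, h']
    · -- run continues: i1 = i0 + 1
      have hzip : List.zip (i0 :: i1 :: ys') (i1 :: ys') = (i0, i1) :: List.zip (i1 :: ys') ys' := by
        simp [List.zip]
      simp only [List.length_cons] at hdrop ⊢
      rw [show (i0 :: i1 :: ys').drop (ys'.length + 1) = (i1 :: ys').drop ys'.length from hdrop]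
      rw [hzip, List.filter_cons, if_neg (show ¬(((i0, i1).2 != (i0, i1).1 + 1)) = true from h)]
      have hD : (i1 :: ys').drop ys'.length ≠ [] := by
        simp [List.drop_eq_nil_iff]
      set F' := (List.zip (i1 :: ys') ys').filter (fun p => p.2 != p.1 + 1) with hF'
      cases hE : F'.map Prod.fst ++ (i1 :: ys').drop ys'.length with
      | nil => exact absurd (List.append_eq_nil_iff.mp hE).2 hD
      | cons e E'' =>
        have ihm := ih i1
        rw [hE] at ihm
        rw [pvRanges_eq] at ihm
        simp only [List.zip_cons_cons] at ihm
        have he : e = pvEnd i1 ys' := by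
          have := congrArg (fun l => l.headD (0,0)) ihm
          simpa using congrArg Prod.snd this
        have htl : List.zip (F'.map Prod.snd) E'' = pvTail i1 ys' := by
          have := congrArg List.tail ihm
          simpa using this
        have h1 : (i1 == i0 + 1) = true := by
          cases hb : (i1 == i0 + 1) <;> simp_all
        rw [show pvRanges i0 i0 (i1 :: ys') = pvRanges i0 i1 ys' from by simp [pvRanges, h1]]
        rw [pvRanges_eq ys' i0 i1]
        simp [he, htl]

-- ===== VERDICT =====
theorem format_dart_set_spec : Claim_equal_format_dart_set := by
  intro name indices columns rows _ _
  unfold Spec_format_dart_set format_dart_set format_dart_set_alt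
  cases indices with
  | nil => simp [find_contiguous_ranges, PySem.List.slice]
  | cons i0 rest =>
    have hs1 : PySem.List.slice (i0 :: rest) none (some 1) = [i0] := by
      simpa using PySem.List.slice_to (i0 :: rest) (b := 1) (by omega)
    have hsm1 : PySem.List.slice (i0 :: rest) (some (-1)) none = (i0 :: rest).drop rest.length := by
      simpa using PySem.List.slice_from_neg_one (i0 :: rest)
    simp only [fcr_eq, PySem.List.foldl_append_singleton_eq_map,
      PySem.List.slice_from_one, hs1, hsm1, List.tail_cons, List.singleton_append]
    rw [← zip_starts_ends rest i0]
    congr 1
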